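-- pv_equiv track=rewrite | github.com/ffranr/ipsl | ipsl/cmd/links.py | _add_protocol_entries
-- ===== SOURCE A (Python) =====
-- def _add_ipfs_entry(_map, protocol_info):
--     location_protocols_mapping = {
--         _protocol: info['address']
--         for _protocol, info in protocol_info.items()
--         if _protocol != 'ipfs'
--     }
--     entry = {protocol_info['ipfs']['address']: location_protocols_mapping}
--     _map['ipfs'].update(entry)
--     return _map
--
-- def _add_protocol_entries(_map, protocol_info):
--     _map = _add_ipfs_entry(_map, protocol_info)
--     for protocol, info in protocol_info.items():
--         if protocol == 'ipfs':
--             continue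
--         entry = {info['address']: {'ipfs': protocol_info['ipfs']['address']}}
--         _map[protocol].update(entry)
--     return _map
-- ===== SOURCE B (Python) =====
-- def _add_protocol_entries(_map, protocol_info):
--     # Different decomposition: instead of mutating _map per protocol (A's helper +
--     # second loop over protocol_info), rebuild the whole map in ONE pass over
--     # _map.items(), choosing each entry's new value by looking the key up in
--     # protocol_info.  Returns a NEW dict (A mutates _map in place); the
--     # equivalence claimed is about the return value.
--     ipfs_address = protocol_info['ipfs']['address']
--     mapping = {p: info['address'] for p, info in protocol_info.items() if p != 'ipfs'}
--     result = {}
--     for key, inner in _map.items():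
--         if key == 'ipfs':
--             result[key] = {**inner, ipfs_address: mapping}
--         elif key in protocol_info:
--             result[key] = {**inner, protocol_info[key]['address']: {'ipfs': ipfs_address}}
--         else:
--             result[key] = inner
--     return result
-- ===== Notes on version B (the rewrite author's own statement) =====
-- stated objective: alternative
-- what changed: Instead of A's in-place per-protocol updates driven by protocol_info (helper comprehension + second loop mutating _map[protocol] one key at a time), B rebuilds the whole map in a single pass over _map.items(), choosing each entry's new value by looking its key up in protocol_info; B returns a fresh dict and does not mutate _map (the equivalence is about the return value). Pre_ also rules out duplicate-key association lists, which represent no Python dict.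
import Mathlib
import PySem

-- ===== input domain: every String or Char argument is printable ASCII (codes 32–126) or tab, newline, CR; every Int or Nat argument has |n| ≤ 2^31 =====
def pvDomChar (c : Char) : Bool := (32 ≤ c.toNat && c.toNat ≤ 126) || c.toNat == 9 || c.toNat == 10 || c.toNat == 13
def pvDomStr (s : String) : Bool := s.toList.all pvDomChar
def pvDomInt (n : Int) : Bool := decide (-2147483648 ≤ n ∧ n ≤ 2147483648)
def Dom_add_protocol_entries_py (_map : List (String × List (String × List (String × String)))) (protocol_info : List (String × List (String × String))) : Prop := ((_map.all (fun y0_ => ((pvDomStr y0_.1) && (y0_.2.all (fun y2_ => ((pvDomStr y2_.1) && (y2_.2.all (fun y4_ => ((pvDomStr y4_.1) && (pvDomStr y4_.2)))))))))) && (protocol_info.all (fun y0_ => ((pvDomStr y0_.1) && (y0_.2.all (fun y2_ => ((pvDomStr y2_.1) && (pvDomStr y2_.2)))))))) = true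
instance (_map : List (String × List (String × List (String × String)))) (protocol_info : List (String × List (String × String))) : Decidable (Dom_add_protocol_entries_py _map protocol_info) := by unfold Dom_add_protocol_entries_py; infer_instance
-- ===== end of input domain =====

-- B rebuilds the whole map in ONE pass over _map.items() (each entry's new value chosen by
-- looking its key up in protocol_info), instead of A's per-protocol in-place updates driven
-- by protocol_info; A mutates _map in place while B returns a fresh dict — the equivalence
-- proved here is about the RETURN value only (objective: alternative decomposition).

-- Shared Python-dict primitives over association lists (exact Python dict semantics via PySem.Dict).
def pvDGet? {ν : Type} (l : List (String × ν)) (k : String) : Option ν :=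
  (PySem.Dict.mk l).get? k
def pvDInsert {ν : Type} (l : List (String × ν)) (k : String) (v : ν) : List (String × ν) :=
  ((PySem.Dict.mk l).insert k v).items

-- ===== PORT A =====
-- _add_ipfs_entry: comprehension building location_protocols_mapping, then _map['ipfs'].update(entry)
def add_ipfs_entry_py (_map : List (String × List (String × List (String × String)))) (protocol_info : List (String × List (String × String))) : List (String × List (String × List (String × String))) :=
  let mapping := protocol_info.foldl
    (fun acc p => if p.1 == "ipfs" then acc else pvDInsert acc p.1 ((pvDGet? p.2 "address").getD ""))
    []
  let ipfsAddr := (pvDGet? ((pvDGet? protocol_info "ipfs").getD []) "address").getD ""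
  (((PySem.Dict.mk _map).modify "ipfs" [] (fun d => pvDInsert d ipfsAddr mapping))).items

-- _add_protocol_entries: the helper, then the for-loop updating _map[protocol] per item
def add_protocol_entries_py (_map : List (String × List (String × List (String × String)))) (protocol_info : List (String × List (String × String))) : List (String × List (String × List (String × String))) :=
  let m1 := add_ipfs_entry_py _map protocol_info
  (protocol_info.foldl
    (fun m p => if p.1 == "ipfs" then m else
      m.modify p.1 [] (fun d => pvDInsert d ((pvDGet? p.2 "address").getD "")
        [("ipfs", (pvDGet? ((pvDGet? protocol_info "ipfs").getD []) "address").getD "")]))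
    (PySem.Dict.mk m1)).items

-- ===== PORT B =====
-- one pass over _map.items(), building a fresh result dict; each key's new value is decided
-- by looking the key up in protocol_info ('ipfs' / member of protocol_info / untouched)
def add_protocol_entries_py_alt (_map : List (String × List (String × List (String × String)))) (protocol_info : List (String × List (String × String))) : List (String × List (String × List (String × String))) :=
  let ipfsAddr := (pvDGet? ((pvDGet? protocol_info "ipfs").getD []) "address").getD ""
  let mapping := protocol_info.foldl
    (fun acc p => if p.1 == "ipfs" then acc else pvDInsert acc p.1 ((pvDGet? p.2 "address").getD ""))
    []
  (_map.foldl
    (fun (result : PySem.Dict String (List (String × List (String × String)))) kv =>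
      if kv.1 == "ipfs" then
        result.insert kv.1 (pvDInsert kv.2 ipfsAddr mapping)
      else if (PySem.Dict.mk protocol_info).contains kv.1 then
        result.insert kv.1 (pvDInsert kv.2 ((pvDGet? ((pvDGet? protocol_info kv.1).getD []) "address").getD "") [("ipfs", ipfsAddr)])
      else
        result.insert kv.1 kv.2)
    PySem.Dict.empty).items

-- ===== PRECONDITION & SPEC =====
-- Pre_ = exactly the inputs on which the Python A returns (no KeyError): protocol_info has an
-- 'ipfs' entry whose dict has 'address', every non-'ipfs' info dict has 'address', and _map
-- contains 'ipfs' and every non-'ipfs' protocol of protocol_info.  It also requires the two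
-- top-level association lists to have distinct keys: a list with duplicate keys represents no
-- Python dict at all (Python dict keys are unique), so no Python input is excluded by that.
def Pre_add_protocol_entries_py (_map : List (String × List (String × List (String × String)))) (protocol_info : List (String × List (String × String))) : Prop :=
  (_map.map Prod.fst).Nodup ∧
  (protocol_info.map Prod.fst).Nodup ∧
  (PySem.Dict.mk protocol_info).contains "ipfs" = true ∧
  (PySem.Dict.mk (((PySem.Dict.mk protocol_info).get? "ipfs").getD [])).contains "address" = true ∧
  (PySem.Dict.mk _map).contains "ipfs" = true ∧
  (∀ p ∈ protocol_info, p.1 ≠ "ipfs" →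
    (PySem.Dict.mk p.2).contains "address" = true ∧ (PySem.Dict.mk _map).contains p.1 = true)
instance (_map : List (String × List (String × List (String × String)))) (protocol_info : List (String × List (String × String))) : Decidable (Pre_add_protocol_entries_py _map protocol_info) := by unfold Pre_add_protocol_entries_py; infer_instance

def pvWitness_add_protocol_entries_py : (List (String × List (String × List (String × String)))) × (List (String × List (String × String))) :=
  ([("ipfs", []), ("http", [])], [("ipfs", [("address", "Qm")]), ("http", [("address", "h")])])

def Spec_add_protocol_entries_py (_map : List (String × List (String × List (String × String)))) (protocol_info : List (String × List (String × String))) (out : List (String × List (String × List (String × String)))) : Prop := out = add_protocol_entries_py_alt _map protocol_info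
instance (_map : List (String × List (String × List (String × String)))) (protocol_info : List (String × List (String × String))) (out : List (String × List (String × List (String × String)))) : Decidable (Spec_add_protocol_entries_py _map protocol_info out) := by unfold Spec_add_protocol_entries_py; infer_instance

-- ===== CLAIM =====
def Claim_equal_add_protocol_entries_py : Prop := ∀ (_map : List (String × List (String × List (String × String)))) (protocol_info : List (String × List (String × String))), Dom_add_protocol_entries_py _map protocol_info → Pre_add_protocol_entries_py _map protocol_info → Spec_add_protocol_entries_py _map protocol_info (add_protocol_entries_py _map protocol_info)

-- ===== LEMMAS AND PROOFS =====

-- one in-place modify at a present key rewrites exactly that item's value (keys distinct)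
theorem pv_items_modify {ν : Type} (d : PySem.Dict String ν) (k : String) (dflt : ν) (f : ν → ν)
    (hnd : d.keys.Nodup) (hk : d.contains k = true) :
    (d.modify k dflt f).items = d.items.map (fun q => if q.1 == k then (q.1, f q.2) else q) := by
  show (d.insert k (f (d.getD k dflt))).items = _
  rw [PySem.Dict.items_insert_of_contains _ _ hk]
  apply List.map_congr_left
  intro q hq
  by_cases h : q.1 = k
  · have : d.getD k dflt = q.2 := by
      have : (q.1, q.2) ∈ d.items := hq
      rw [← h]; exact PySem.Dict.getD_of_mem_items d this hnd dflt
    simp [h, this]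
  · simp [h]

theorem pv_nodup_modify {ν : Type} (d : PySem.Dict String ν) (k : String) (dflt : ν) (f : ν → ν)
    (hnd : d.keys.Nodup) (hk : d.contains k = true) :
    (d.modify k dflt f).keys.Nodup := by
  have := pv_items_modify d k dflt f hnd hk
  have hkeys : (d.modify k dflt f).keys = d.keys := by
    simp only [PySem.Dict.keys, this, List.map_map]
    apply List.map_congr_left
    intro q _
    by_cases h : q.1 = k <;> simp [h, Function.comp]
  rw [hkeys]; exact hnd

-- A's per-protocol loop of in-place modifies, characterised item-wise:
-- each item of d gets the update of the (unique) matching non-'ipfs' protocol, if any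
theorem pv_fold_modify_items {ν X : Type} (u : (String × X) → ν → ν) (dflt : ν)
    (ps : List (String × X)) (d : PySem.Dict String ν)
    (hnd : d.keys.Nodup) (hps : (ps.map Prod.fst).Nodup)
    (hc : ∀ p ∈ ps, p.1 ≠ "ipfs" → d.contains p.1 = true) :
    (ps.foldl (fun M p => if p.1 == "ipfs" then M else M.modify p.1 dflt (u p)) d).items
      = d.items.map (fun q =>
          match ps.find? (fun p => p.1 == q.1 && !(p.1 == "ipfs")) with
          | some p => (q.1, u p q.2)
          | none => q) := by
  induction ps generalizing d with
  | nil => simp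
  | cons p ps ih =>
    by_cases hp : p.1 = "ipfs"
    · simp only [List.foldl_cons, hp, BEq.rfl, if_true]
      rw [ih d hnd (List.Nodup.of_cons hps) (fun p' hp' => hc p' (List.mem_cons_of_mem _ hp'))]
      apply List.map_congr_left
      intro q _
      have : (p.1 == q.1 && !(p.1 == "ipfs")) = false := by simp [hp]
      simp [List.find?, this]
    · have hpc : d.contains p.1 = true := hc p (List.mem_cons_self ..) hp
      have hpne : (p.1 == "ipfs") = false := by simpa using hp
      simp only [List.foldl_cons, hpne, Bool.false_eq_true, if_false]
      rw [ih (d.modify p.1 dflt (u p)) (pv_nodup_modify d p.1 dflt (u p) hnd hpc)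
            (List.Nodup.of_cons hps)
            (fun p' hp' hne' => by
              rw [PySem.Dict.contains_modify]
              simp [hc p' (List.mem_cons_of_mem _ hp') hne'])]
      rw [pv_items_modify d p.1 dflt (u p) hnd hpc, List.map_map]
      apply List.map_congr_left
      intro q _
      have hnotin : ∀ p' ∈ ps, (p'.1 == p.1) = false := by
        intro p' hp'
        have hmem : p'.1 ∈ ps.map Prod.fst := List.mem_map_of_mem hp'
        have hne : p'.1 ≠ p.1 := fun h => (List.nodup_cons.mp hps).1 (h ▸ hmem)
        simpa using hne
      by_cases hq : q.1 = p.1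
      · have hfind : ps.find? (fun p' => p'.1 == p.1 && !(p'.1 == "ipfs")) = none := by
          apply List.find?_eq_none.mpr
          intro p' hp'
          simp [hnotin p' hp']
        simp only [Function.comp, hq, BEq.rfl, if_true, List.find?, hpne]
        simp [hfind]
      · have hqb : (q.1 == p.1) = false := by simpa using hq
        have hpb : (p.1 == q.1) = false := by simpa using (Ne.symm hq)
        simp only [Function.comp, hqb, Bool.false_eq_true, if_false, List.find?, hpb,
          Bool.false_and]

-- B's build-a-fresh-dict loop appends one item per input item (keys distinct)
theorem pv_fold_insert_items {ν X : Type} (xs : List (String × X)) (g : (String × X) → ν)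
    (hnd : (xs.map Prod.fst).Nodup) :
    (xs.foldl (fun (r : PySem.Dict String ν) kv => r.insert kv.1 (g kv)) PySem.Dict.empty).items
      = xs.map (fun kv => (kv.1, g kv)) := by
  have := PySem.Dict.items_foldl_insert_fresh xs Prod.fst g PySem.Dict.empty
    (fun a _ => by simp [PySem.Dict.contains_empty]) hnd
  simpa [PySem.Dict.empty] using this

-- ===== VERDICT (by name: the statement is the Claim_ definition above) =====
theorem add_protocol_entries_py_spec : Claim_equal_add_protocol_entries_py := by
  intro _map protocol_info _ hpre
  obtain ⟨hndm, hndp, hipfs_pi, _haddr, hipfs_map, hall⟩ := hpre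
  unfold Spec_add_protocol_entries_py
  unfold add_protocol_entries_py add_ipfs_entry_py add_protocol_entries_py_alt
  simp only []
  set a := (pvDGet? ((pvDGet? protocol_info "ipfs").getD []) "address").getD "" with ha
  set L := protocol_info.foldl
    (fun acc p => if p.1 == "ipfs" then acc else pvDInsert acc p.1 ((pvDGet? p.2 "address").getD ""))
    [] with hL
  -- keys of Dict.mk _map are the raw first components
  have hkeys0 : (PySem.Dict.mk _map).keys = _map.map Prod.fst := rfl
  have hnd0 : (PySem.Dict.mk _map).keys.Nodup := by rw [hkeys0]; exact hndm
  -- step 1: the 'ipfs' modify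
  set M1 := (PySem.Dict.mk _map).modify "ipfs" [] (fun d => pvDInsert d a L) with hM1
  have hM1items : M1.items = _map.map
      (fun q => if q.1 == "ipfs" then (q.1, pvDInsert q.2 a L) else q) :=
    pv_items_modify _ _ _ _ hnd0 hipfs_map
  have hM1nd : M1.keys.Nodup := pv_nodup_modify _ _ _ _ hnd0 hipfs_map
  have hM1mk : PySem.Dict.mk M1.items = M1 := rfl
  rw [hM1mk]
  -- step 2: the per-protocol loop, item-wise
  rw [pv_fold_modify_items
        (fun p d => pvDInsert d ((pvDGet? p.2 "address").getD "") [("ipfs", a)]) []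
        protocol_info M1 hM1nd hndp
        (fun p hp hne => by
          rw [hM1, PySem.Dict.contains_modify]
          simp [(hall p hp hne).2])]
  -- B's loop, item-wise
  have hstep : (fun (result : PySem.Dict String (List (String × List (String × String)))) (kv : String × List (String × List (String × String))) =>
      if kv.1 == "ipfs" then
        result.insert kv.1 (pvDInsert kv.2 a L)
      else if (PySem.Dict.mk protocol_info).contains kv.1 then
        result.insert kv.1 (pvDInsert kv.2 ((pvDGet? ((pvDGet? protocol_info kv.1).getD []) "address").getD "") [("ipfs", a)])
      else
        result.insert kv.1 kv.2) = (fun (r : PySem.Dict String (List (String × List (String × String)))) (kv : String × List (String × List (String × String))) => r.insert kv.1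
          (if kv.1 == "ipfs" then pvDInsert kv.2 a L
           else if (PySem.Dict.mk protocol_info).contains kv.1 then
             pvDInsert kv.2 ((pvDGet? ((pvDGet? protocol_info kv.1).getD []) "address").getD "") [("ipfs", a)]
           else kv.2)) := by
    funext r kv
    by_cases h1 : (kv.1 == "ipfs") = true <;> by_cases h2 : (PySem.Dict.mk protocol_info).contains kv.1 = true <;>
      simp [h1, h2]
  rw [hstep, pv_fold_insert_items _map _ hndm, hM1items, List.map_map]
  -- pointwise equality of the two per-item transforms
  apply List.map_congr_left
  intro q _
  by_cases hq : q.1 = "ipfs"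
  · simp only [Function.comp, hq, BEq.rfl, if_true]
    rw [List.find?_eq_none.mpr (fun p _ => by simp)]
  · have hqb : (q.1 == "ipfs") = false := by simpa using hq
    have hcond : ∀ p : String × List (String × String),
        (p.1 == q.1 && !(p.1 == "ipfs")) = (p.1 == q.1) := by
      intro p
      by_cases h : p.1 = q.1
      · simp [h, hq]
      · simp [h]
    have hfind : protocol_info.find? (fun p => p.1 == q.1 && !(p.1 == "ipfs"))
        = protocol_info.find? (fun p => p.1 == q.1) := by
      congr 1
      funext p
      exact hcond p
    simp only [Function.comp, hqb, Bool.false_eq_true, if_false, hfind]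
    cases hf : protocol_info.find? (fun p => p.1 == q.1) with
    | none =>
      have hcont : (PySem.Dict.mk protocol_info).contains q.1 = false := by
        simp only [PySem.Dict.contains]
        rw [List.any_eq_false]
        intro p hp
        have := List.find?_eq_none.mp hf p hp
        simpa using this
      simp [hcont]
    | some p =>
      have hcont : (PySem.Dict.mk protocol_info).contains q.1 = true := by
        simp only [PySem.Dict.contains]
        rw [List.any_eq_true]
        have hsat := List.find?_some hf
        exact ⟨p, List.mem_of_find?_eq_some hf, hsat⟩
      have hget : pvDGet? protocol_info q.1 = some p.2 := by
        simp only [pvDGet?, PySem.Dict.get?]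
        show Option.map _ (List.find? _ (PySem.Dict.mk protocol_info).items) = _
        have : (PySem.Dict.mk protocol_info).items = protocol_info := rfl
        rw [this, hf]
        rfl
      simp [hcont, hget]
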